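-- pv_equiv track=rewrite | github.com/brocolidata/spreadsheet_extractor | src/spreadsheet_extractor/utils/utils.py | get_years_to_load
-- ===== SOURCE A (Python) =====
-- def get_available_year(historic_years, year):
--     return list(range(year-1, year-(historic_years+1), -1))
--
-- def get_years_to_load(historic_years, years):
--     years.sort(reverse=True)
--     dc_available_years = {
--         y:get_available_year(historic_years, y) for y in years
--     }
--     dc_years = {}
--     for year in years:
--         dc = {
--             ay:year for ay in dc_available_years[year] if ay not in dc_years
--         }
--         dc_years.update(dc)
--     return dc_years
-- ===== SOURCE B (Python) =====
-- def get_years_to_load(historic_years, years):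
--     # Same return value as the original; `years` is still sorted in place (descending).
--     years.sort(reverse=True)
--     out = {}
--     bound = 0  # once out is non-empty: every already-claimed year is >= bound
--     for y in years:
--         lo = y - historic_years
--         hi = y - 1 if not out else min(y - 1, bound - 1)
--         for ay in range(hi, lo - 1, -1):
--             out[ay] = y
--         bound = lo
--     return out
-- ===== Notes on version B (the rewrite author's own statement) =====
-- stated objective: faster
-- what changed: Replaces the precomputed per-year availability dict and the per-key membership test against the growing result dict by a single descending pass that keeps one integer watermark (the lowest year already claimed) and truncates each year's claiming range arithmetically, inserting without any membership check.
import Mathlib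
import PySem

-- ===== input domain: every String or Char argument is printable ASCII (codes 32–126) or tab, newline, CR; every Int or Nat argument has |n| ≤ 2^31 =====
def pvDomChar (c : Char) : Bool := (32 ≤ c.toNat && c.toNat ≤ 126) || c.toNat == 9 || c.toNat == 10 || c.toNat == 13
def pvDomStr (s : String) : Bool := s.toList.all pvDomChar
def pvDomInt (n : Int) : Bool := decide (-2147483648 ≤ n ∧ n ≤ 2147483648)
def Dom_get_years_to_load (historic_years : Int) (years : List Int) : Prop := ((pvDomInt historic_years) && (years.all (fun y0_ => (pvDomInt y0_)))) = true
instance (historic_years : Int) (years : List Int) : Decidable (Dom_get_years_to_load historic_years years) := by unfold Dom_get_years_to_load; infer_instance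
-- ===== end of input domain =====

-- B replaces A's precomputed availability dict and per-key membership tests by one descending
-- pass with an integer watermark; the equivalence is about the RETURN value (both A and B also
-- sort `years` in place, the same observable mutation).

-- ===== PORT A =====
def get_available_year (historic_years : Int) (year : Int) : List Int :=
  PySem.List.pyRange (year - 1) (year - (historic_years + 1)) (-1)

def get_years_to_load (historic_years : Int) (years : List Int) : List (Int × Int) :=
  let ys := PySem.List.sorted years (fun x => x) true
  let dc_available_years : PySem.Dict Int (List Int) :=
    ys.foldl (fun d y => d.insert y (get_available_year historic_years y)) PySem.Dict.empty
  -- dc_available_years[year]: the key is always present (year ∈ ys), so getD is exact here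
  let dc_years : PySem.Dict Int Int :=
    ys.foldl (fun dc_years year =>
      let dc : PySem.Dict Int Int :=
        (dc_available_years.getD year []).foldl
          (fun d ay => if dc_years.contains ay then d else d.insert ay year)
          PySem.Dict.empty
      dc_years.update dc.items) PySem.Dict.empty
  dc_years.items

-- ===== PORT B =====
def get_years_to_load_alt (historic_years : Int) (years : List Int) : List (Int × Int) :=
  let ys := PySem.List.sorted years (fun x => x) true
  let st : PySem.Dict Int Int × Int :=
    ys.foldl (fun st y =>
      let lo := y - historic_years
      let hi := if st.1.size = 0 then y - 1 else min (y - 1) (st.2 - 1)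
      ((PySem.List.pyRange hi (lo - 1) (-1)).foldl (fun d ay => d.insert ay y) st.1, lo))
      (PySem.Dict.empty, 0)
  st.1.items

-- ===== PRECONDITION & SPEC =====
def Spec_get_years_to_load (historic_years : Int) (years : List Int) (out : List (Int × Int)) : Prop := out = get_years_to_load_alt historic_years years
instance (historic_years : Int) (years : List Int) (out : List (Int × Int)) : Decidable (Spec_get_years_to_load historic_years years out) := by unfold Spec_get_years_to_load; infer_instance

-- ===== CLAIM (what is proved, stated in full; the proofs are below) =====
def Claim_equal_get_years_to_load : Prop := ∀ (historic_years : Int) (years : List Int), Dom_get_years_to_load historic_years years → Spec_get_years_to_load historic_years years (get_years_to_load historic_years years)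

-- ===== LEMMAS AND PROOFS =====

-- One step of A's main loop, with the availability-dict lookup already resolved.
def stepA (historic_years : Int) (dcy : PySem.Dict Int Int) (year : Int) : PySem.Dict Int Int :=
  dcy.update (((get_available_year historic_years year).foldl
    (fun d ay => if dcy.contains ay then d else d.insert ay year) PySem.Dict.empty).items)

-- One step of B's loop.
def stepB (historic_years : Int) (st : PySem.Dict Int Int × Int) (y : Int) : PySem.Dict Int Int × Int :=
  let lo := y - historic_years
  let hi := if st.1.size = 0 then y - 1 else min (y - 1) (st.2 - 1)
  ((PySem.List.pyRange hi (lo - 1) (-1)).foldl (fun d ay => d.insert ay y) st.1, lo)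

lemma getD_avail (historic_years : Int) :
    ∀ (l : List Int) (d : PySem.Dict Int (List Int)) (y : Int),
    (l.foldl (fun d x => d.insert x (get_available_year historic_years x)) d).getD y [] =
      if y ∈ l then get_available_year historic_years y else d.getD y [] := by
  intro l
  induction l with
  | nil => intro d y; simp
  | cons x t ih =>
    intro d y
    rw [List.foldl_cons, ih]
    by_cases hyt : y ∈ t
    · simp [hyt]
    · by_cases hyx : y = x
      · simp [hyx]
      · simp [hyx, PySem.Dict.getD_insert]

lemma A_form (historic_years : Int) (years : List Int) :
    get_years_to_load historic_years years =
      ((PySem.List.sorted years (fun x => x) true).foldl (stepA historic_years) PySem.Dict.empty).items := by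
  simp only [get_years_to_load]
  congr 1
  apply PySem.List.foldl_congr_mem
  intro acc x hx
  simp only [stepA]
  rw [getD_avail, if_pos hx]

lemma B_form (historic_years : Int) (years : List Int) :
    get_years_to_load_alt historic_years years =
      (((PySem.List.sorted years (fun x => x) true).foldl (stepB historic_years)
        (PySem.Dict.empty, 0)).1).items := rfl

lemma nodup_rangeNeg (a c : Int) : (PySem.List.pyRange a c (-1)).Nodup := by
  rw [PySem.List.pyRange_neg_one_eq_reverse]
  exact List.nodup_reverse.mpr (PySem.List.nodup_pyRange_one _ _)

lemma contains_fold (d : PySem.Dict Int Int) (y a c k : Int) :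
    (((PySem.List.pyRange a c (-1)).foldl (fun d ay => d.insert ay y) d).contains k = true) ↔
      (d.contains k = true ∨ (c < k ∧ k ≤ a)) := by
  rw [PySem.Dict.contains_iff_mem_keys,
    show ((PySem.List.pyRange a c (-1)).foldl (fun d ay => d.insert ay y) d).keys
        = PySem.Set.update d.keys (PySem.List.pyRange a c (-1)) from
      PySem.Dict.keys_foldl_insert _ (fun _ _ => y) _,
    PySem.Set.mem_update, ← PySem.Dict.contains_iff_mem_keys, PySem.List.mem_pyRange_neg_one]

lemma update_inner (d : PySem.Dict Int Int) (y : Int) (l : List Int) (hn : l.Nodup) :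
    d.update ((l.foldl (fun dc ay => dc.insert ay y) PySem.Dict.empty).items) =
      l.foldl (fun d ay => d.insert ay y) d := by
  have hitems : (l.foldl (fun dc ay => dc.insert ay y) PySem.Dict.empty).items
      = l.map (fun ay => (ay, y)) := by
    have h2 :
        (l.foldl (fun dc ay => dc.insert ay y) (PySem.Dict.empty : PySem.Dict Int Int)).items
          = (PySem.Dict.empty : PySem.Dict Int Int).items ++ l.map (fun ay => (ay, y)) :=
      PySem.Dict.items_foldl_insert_fresh l (fun a => a) (fun _ => y) _
        (fun a _ => PySem.Dict.contains_empty a) (by simpa using hn)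
    simpa using h2
  rw [hitems]
  show (l.map (fun ay => (ay, y))).foldl (fun acc p => acc.insert p.1 p.2) d = _
  rw [List.foldl_map]

lemma bool_eq_decide {b : Bool} {P : Prop} [Decidable P] (h : b = true ↔ P) : b = decide P := by
  by_cases hp : P
  · simp [hp, h.mpr hp]
  · cases hb : b
    · simp [hp]
    · exact absurd (h.mp hb) hp

-- A's per-year comprehension: skipping the keys `d` already holds is truncating the range at b-1,
-- provided membership in `d` below y is exactly "≥ b".
lemma comp_eq (d : PySem.Dict Int Int) (b y : Int)
    (hc : ∀ k, k ≤ y - 1 → d.contains k = decide (b ≤ k)) :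
    ∀ (n : Nat) (a c : Int) (acc : PySem.Dict Int Int), (a - c).toNat ≤ n → a ≤ y - 1 →
    (PySem.List.pyRange a c (-1)).foldl
        (fun dc ay => if d.contains ay then dc else dc.insert ay y) acc
      = (PySem.List.pyRange (min a (b - 1)) c (-1)).foldl (fun dc ay => dc.insert ay y) acc := by
  intro n
  induction n with
  | zero =>
    intro a c acc hn _
    rw [PySem.List.pyRange_neg_one_eq_nil (by omega),
      PySem.List.pyRange_neg_one_eq_nil (by omega)]
    rfl
  | succ m ih =>
    intro a c acc hn ha
    by_cases hac : a ≤ c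
    · rw [PySem.List.pyRange_neg_one_eq_nil hac, PySem.List.pyRange_neg_one_eq_nil (by omega)]
      rfl
    · rw [PySem.List.pyRange_neg_one_cons (by omega), List.foldl_cons, hc a ha]
      by_cases hba : b ≤ a
      · rw [if_pos (by simpa using hba), ih (a - 1) c acc (by omega) (by omega),
          show min (a - 1) (b - 1) = min a (b - 1) by omega]
      · rw [if_neg (by simpa using hba), ih (a - 1) c (acc.insert a y) (by omega) (by omega),
          show min (a - 1) (b - 1) = a - 1 by omega, show min a (b - 1) = a by omega,
          PySem.List.pyRange_neg_one_cons (by omega : c < a), List.foldl_cons]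

lemma stepA_eq (historic_years b y : Int) (d : PySem.Dict Int Int)
    (hc : ∀ k, k ≤ y - 1 → d.contains k = decide (b ≤ k)) :
    stepA historic_years d y =
      (PySem.List.pyRange (min (y - 1) (b - 1)) (y - historic_years - 1) (-1)).foldl
        (fun d ay => d.insert ay y) d := by
  simp only [stepA, get_available_year]
  rw [show y - (historic_years + 1) = y - historic_years - 1 by ring]
  rw [comp_eq d b y hc ((y - 1) - (y - historic_years - 1)).toNat (y - 1)
    (y - historic_years - 1) PySem.Dict.empty (le_refl _) (le_refl _)]
  exact update_inner d y _ (nodup_rangeNeg _ _)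

lemma size_ne_zero_of_contains (d : PySem.Dict Int Int) (k : Int)
    (hc : d.contains k = true) : d.size ≠ 0 := by
  intro h0
  have hk := (PySem.Dict.contains_iff_mem_keys d k).mp hc
  have hitems : d.items = [] := List.length_eq_zero_iff.mp h0
  have hkeys : d.keys = [] := by simp [PySem.Dict.keys, hitems]
  rw [hkeys] at hk
  exact absurd hk (List.not_mem_nil)

-- Main loop invariant: once one year has been processed (last processed year p, watermark p - h),
-- A's state and B's dict component coincide and membership below p is exactly "≥ p - h".
lemma loop (historic_years : Int) (hh : 1 ≤ historic_years) :
    ∀ (s : List Int) (d : PySem.Dict Int Int) (p : Int),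
    (∀ x ∈ s, x ≤ p) → s.Pairwise (fun a b => b ≤ a) →
    (∀ k, k ≤ p - 1 → d.contains k = decide (p - historic_years ≤ k)) →
    s.foldl (stepA historic_years) d =
      (s.foldl (stepB historic_years) (d, p - historic_years)).1 := by
  intro s
  induction s with
  | nil => intro d p _ _ _; rfl
  | cons y t ih =>
    intro d p hle hpw hchar
    have hy : y ≤ p := hle y (by simp)
    have hcont : d.contains (p - historic_years) = true := by
      rw [hchar _ (by omega)]; simp
    have hsize := size_ne_zero_of_contains d _ hcont
    have hcy : ∀ k, k ≤ y - 1 → d.contains k = decide (p - historic_years ≤ k) :=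
      fun k hk => hchar k (by omega)
    have hB : stepB historic_years (d, p - historic_years) y =
        ((PySem.List.pyRange (min (y - 1) (p - historic_years - 1))
          (y - historic_years - 1) (-1)).foldl (fun d ay => d.insert ay y) d,
          y - historic_years) := by
      simp only [stepB]
      rw [if_neg hsize]
    have hA := stepA_eq historic_years (p - historic_years) y d hcy
    rw [List.foldl_cons, List.foldl_cons, hA, hB]
    apply ih _ y (fun x hx => (List.pairwise_cons.mp hpw).1 x hx) (List.pairwise_cons.mp hpw).2
    intro k hk
    apply bool_eq_decide
    rw [contains_fold]
    have hd : d.contains k = true ↔ p - historic_years ≤ k := by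
      rw [hchar k (by omega)]; simp
    rw [hd]
    omega

-- Degenerate historic_years ≤ 0: every claiming range is empty, so both loops do nothing.
lemma A_trivial (historic_years : Int) (hh : historic_years ≤ 0) (s : List Int) :
    s.foldl (stepA historic_years) PySem.Dict.empty = PySem.Dict.empty := by
  rw [PySem.List.foldl_congr_mem s _ (fun acc _ => acc) _ ?_]
  · exact PySem.List.foldl_ignore s PySem.Dict.empty
  · intro acc x _
    simp only [stepA, get_available_year]
    rw [PySem.List.pyRange_neg_one_eq_nil (by omega)]
    rfl

lemma B_trivial (historic_years : Int) (hh : historic_years ≤ 0) :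
    ∀ (s : List Int) (b0 : Int),
    (s.foldl (stepB historic_years) (PySem.Dict.empty, b0)).1 = PySem.Dict.empty := by
  intro s
  induction s with
  | nil => intro b0; rfl
  | cons y t ih =>
    intro b0
    rw [List.foldl_cons,
      show stepB historic_years (PySem.Dict.empty, b0) y
          = ((PySem.Dict.empty : PySem.Dict Int Int), y - historic_years) from ?_]
    · exact ih _
    · simp only [stepB]
      rw [if_pos (by simp), PySem.List.pyRange_neg_one_eq_nil (by omega)]
      rfl

-- ===== VERDICT (by name: the statement is the Claim_ definition above) =====
theorem get_years_to_load_spec : Claim_equal_get_years_to_load := by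
  intro historic_years years _
  unfold Spec_get_years_to_load
  rw [A_form, B_form]
  by_cases hh : historic_years ≤ 0
  · rw [A_trivial historic_years hh, B_trivial historic_years hh]
  · have hh1 : 1 ≤ historic_years := by omega
    have hpw := PySem.List.sorted_pairwise_rev years (fun x => x)
    cases hys : PySem.List.sorted years (fun x => x) true with
    | nil => rfl
    | cons y t =>
      rw [hys] at hpw
      congr 1
      rw [List.foldl_cons, List.foldl_cons]
      have hA1 : stepA historic_years PySem.Dict.empty y =
          (PySem.List.pyRange (y - 1) (y - historic_years - 1) (-1)).foldl
            (fun d ay => d.insert ay y) PySem.Dict.empty := by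
        rw [stepA_eq historic_years y y PySem.Dict.empty
          (fun k hk => by rw [PySem.Dict.contains_empty]; symm; simp; omega)]
        rw [show min (y - 1) (y - 1) = y - 1 by omega]
      have hB1 : stepB historic_years (PySem.Dict.empty, 0) y =
          ((PySem.List.pyRange (y - 1) (y - historic_years - 1) (-1)).foldl
            (fun d ay => d.insert ay y) PySem.Dict.empty, y - historic_years) := by
        simp only [stepB]
        rw [if_pos (by simp)]
      rw [hA1, hB1]
      apply loop historic_years hh1 t _ y
        (fun x hx => (List.pairwise_cons.mp hpw).1 x hx) (List.pairwise_cons.mp hpw).2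
      intro k hk
      apply bool_eq_decide
      rw [contains_fold]
      simp only [PySem.Dict.contains_empty]
      constructor
      · rintro (h | h)
        · exact absurd h (by simp)
        · omega
      · intro h; right; omega
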